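-- pv_equiv track=rewrite | github.com/naruto716/coin_detection | Utils/edge_detection.py | border_ignore_filter
-- ===== SOURCE A (Python) =====
-- def border_ignore_filter(pixel_array, kernel):
--     image_height = len(pixel_array)
--     image_width = len(pixel_array[0])
--     result_array = [[0 for _ in range(image_width)] for _ in range(image_height)]  # Initialize the array
--
--     for row in range(1, image_height - 1):
--         for col in range(1, image_width - 1):
--             accumulator = 0
--             for i in range(-1, 1 + 1):  # row
--                 for j in range(-1, 1 + 1):  # column
--                     image_value = pixel_array[row + i][col + j]
--                     kernel_value = kernel[i + 1][j + 1]  # +1 to shift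
--                     accumulator += image_value * kernel_value
--             result_array[row][col] = accumulator
--
--     return result_array
-- ===== SOURCE B (Python) =====
-- def border_ignore_filter(pixel_array, kernel):
--     image_height = len(pixel_array)
--     image_width = len(pixel_array[0])
--     result_array = [[0] * image_width for _ in range(image_height)]
--     if image_height < 3 or image_width < 3:
--         return result_array  # no interior pixels
--
--     # scatter: accumulate one shifted, scaled copy of the image per kernel tap
--     for i in (-1, 0, 1):
--         for j in (-1, 0, 1):
--             k = kernel[i + 1][j + 1]
--             for row in range(1, image_height - 1):
--                 src = pixel_array[row + i]
--                 dst = result_array[row]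
--                 for col in range(1, image_width - 1):
--                     dst[col] += k * src[col + j]
--     return result_array
-- ===== Notes on version B (the rewrite author's own statement) =====
-- stated objective: alternative
-- what changed: B replaces A's per-pixel gather (nested 3x3 accumulator loop inside the row/col loops) with a scatter/shift-add scheme: the outer loops run over the nine kernel taps and each tap adds one shifted, scaled copy of the image into the result array, hoisting the kernel-tap lookup out of the per-pixel loops.
import Mathlib
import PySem

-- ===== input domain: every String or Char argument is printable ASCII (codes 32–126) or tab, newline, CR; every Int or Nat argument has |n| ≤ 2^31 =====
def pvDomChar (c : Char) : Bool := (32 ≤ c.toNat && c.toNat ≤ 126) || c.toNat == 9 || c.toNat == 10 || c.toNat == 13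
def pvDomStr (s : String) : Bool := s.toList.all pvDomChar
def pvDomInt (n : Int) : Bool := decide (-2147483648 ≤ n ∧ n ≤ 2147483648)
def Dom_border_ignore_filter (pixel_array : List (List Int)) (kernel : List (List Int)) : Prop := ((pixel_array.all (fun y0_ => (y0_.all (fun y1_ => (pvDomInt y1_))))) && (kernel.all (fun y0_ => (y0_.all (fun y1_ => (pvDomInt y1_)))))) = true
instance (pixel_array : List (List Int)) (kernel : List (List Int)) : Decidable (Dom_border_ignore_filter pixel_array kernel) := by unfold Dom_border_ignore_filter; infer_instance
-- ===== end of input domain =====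

-- B replaces A's per-pixel gather (3x3 accumulator inside the row/col loops) with a scatter
-- scheme: it loops over the nine kernel taps and adds one shifted, scaled copy of the image
-- per tap (objective: alternative decomposition, same asymptotic cost).

-- ===== PORT A =====
-- A-side helper: A's two innermost loops (the 3x3 accumulator), verbatim
def accA (pixel_array kernel : List (List Int)) (row col : Int) : Int :=
  (PySem.List.pyRange (-1) 2 1).foldl (fun acc i =>
    (PySem.List.pyRange (-1) 2 1).foldl (fun acc j =>
      acc + PySem.List.pyGetD (PySem.List.pyGetD pixel_array (row + i) []) (col + j) 0 *
            PySem.List.pyGetD (PySem.List.pyGetD kernel (i + 1) []) (j + 1) 0) acc) 0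

-- pixel_array[0] is read via pyGetD with default []; Pre_ excludes the empty pixel_array on
-- which Python raises IndexError there.
def border_ignore_filter (pixel_array : List (List Int)) (kernel : List (List Int)) : List (List Int) :=
  let image_height : Int := pixel_array.length
  let image_width : Int := (PySem.List.pyGetD pixel_array 0 []).length
  let result_array : List (List Int) :=
    (PySem.List.pyRange 0 image_height 1).map (fun _ =>
      (PySem.List.pyRange 0 image_width 1).map (fun _ => (0 : Int)))
  (PySem.List.pyRange 1 (image_height - 1) 1).foldl (fun res row =>
    (PySem.List.pyRange 1 (image_width - 1) 1).foldl (fun res col =>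
      PySem.List.pySetD res row
        (PySem.List.pySetD (PySem.List.pyGetD res row []) col
          (accA pixel_array kernel row col))) res) result_array

-- ===== PORT B =====
def border_ignore_filter_alt (pixel_array : List (List Int)) (kernel : List (List Int)) : List (List Int) :=
  let image_height : Int := pixel_array.length
  let image_width : Int := (PySem.List.pyGetD pixel_array 0 []).length
  let result_array : List (List Int) :=
    (PySem.List.pyRange 0 image_height 1).map (fun _ => List.replicate image_width.toNat (0 : Int))
  if image_height < 3 ∨ image_width < 3 then result_array
  else
    [(-1 : Int), 0, 1].foldl (fun res i =>
      [(-1 : Int), 0, 1].foldl (fun res j =>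
        let k := PySem.List.pyGetD (PySem.List.pyGetD kernel (i + 1) []) (j + 1) 0
        (PySem.List.pyRange 1 (image_height - 1) 1).foldl (fun res row =>
          let src := PySem.List.pyGetD pixel_array (row + i) []
          PySem.List.pySetD res row
            ((PySem.List.pyRange 1 (image_width - 1) 1).foldl (fun dst col =>
              PySem.List.pySetD dst col
                (PySem.List.pyGetD dst col 0 + k * PySem.List.pyGetD src (col + j) 0))
              (PySem.List.pyGetD res row []))) res) res) result_array

-- ===== PRECONDITION & SPEC =====
-- Pre_ is exactly where Python A returns: a nonempty pixel_array, and — whenever there is an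
-- interior pixel (height ≥ 3 and width ≥ 3) — a kernel with a full 3x3 block and every image
-- row at least as long as row 0 (otherwise A's reads raise IndexError).
def Pre_border_ignore_filter (pixel_array : List (List Int)) (kernel : List (List Int)) : Prop :=
  pixel_array ≠ [] ∧
  (3 ≤ pixel_array.length → 3 ≤ (pixel_array.headD []).length →
    (3 ≤ kernel.length ∧ (∀ kr ∈ kernel.take 3, 3 ≤ kr.length) ∧
     ∀ row ∈ pixel_array, (pixel_array.headD []).length ≤ row.length))
instance (pixel_array : List (List Int)) (kernel : List (List Int)) : Decidable (Pre_border_ignore_filter pixel_array kernel) := by unfold Pre_border_ignore_filter; infer_instance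

def pvWitness_border_ignore_filter : List (List Int) × List (List Int) :=
  ([[1, 2, 3], [4, 5, 6], [7, 8, 9]], [[0, 0, 0], [0, 1, 0], [0, 0, 0]])

def Spec_border_ignore_filter (pixel_array : List (List Int)) (kernel : List (List Int)) (out : List (List Int)) : Prop := out = border_ignore_filter_alt pixel_array kernel
instance (pixel_array : List (List Int)) (kernel : List (List Int)) (out : List (List Int)) : Decidable (Spec_border_ignore_filter pixel_array kernel out) := by unfold Spec_border_ignore_filter; infer_instance

-- ===== CLAIM (what is proved, stated in full; the proofs are below) =====
def Claim_equal_border_ignore_filter : Prop := ∀ (pixel_array : List (List Int)) (kernel : List (List Int)), Dom_border_ignore_filter pixel_array kernel → Pre_border_ignore_filter pixel_array kernel → Spec_border_ignore_filter pixel_array kernel (border_ignore_filter pixel_array kernel)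

-- ===== LEMMAS AND PROOFS =====

-- the Nat index list [1, 2, ..., n]
def rsN (n : Nat) : List Nat := (List.range n).map (fun k => k + 1)

theorem mem_rsN {n r : Nat} : r ∈ rsN n ↔ 1 ≤ r ∧ r < n + 1 := by
  constructor
  · intro h
    simp only [rsN, List.mem_map, List.mem_range] at h
    obtain ⟨a, ha, rfl⟩ := h; omega
  · intro ⟨h1, h2⟩
    simp only [rsN, List.mem_map, List.mem_range]
    exact ⟨r - 1, by omega, by omega⟩

theorem nodup_rsN (n : Nat) : (rsN n).Nodup :=
  (List.nodup_range).map (fun a b h => by omega)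

theorem getD_set_char {α : Type} (m : List α) (r r' : Nat) (v d : α) :
    (m.set r v).getD r' d = if r' = r ∧ r < m.length then v else m.getD r' d := by
  simp only [List.getD_eq_getElem?_getD, List.getElem?_set]
  rcases eq_or_ne r r' with rfl | hne
  · by_cases h2 : r < m.length
    · simp [h2]
    · simp [h2]
  · simp [hne, Ne.symm hne]

theorem set_getD_self {α : Type} (m : List α) (r : Nat) (d : α) :
    m.set r (m.getD r d) = m := by
  by_cases h : r < m.length
  · rw [List.getD_eq_getElem _ _ h]
    exact List.set_getElem_self h
  · exact List.set_eq_of_length_le (by omega)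

theorem gfold_length (F : Nat → List Int → List Int) :
    ∀ (rs : List Nat) (m : List (List Int)),
      (rs.foldl (fun res r => res.set r (F r (res.getD r []))) m).length = m.length := by
  intro rs
  induction rs with
  | nil => intro m; rfl
  | cons r0 rs ih => intro m; simp only [List.foldl_cons]; rw [ih]; simp

theorem gfold_getD (F : Nat → List Int → List Int) :
    ∀ (rs : List Nat), rs.Nodup → ∀ (m : List (List Int)) (r' : Nat),
      (rs.foldl (fun res r => res.set r (F r (res.getD r []))) m).getD r' [] =
        if r' ∈ rs ∧ r' < m.length then F r' (m.getD r' []) else m.getD r' [] := by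
  intro rs
  induction rs with
  | nil => intro _ m r'; simp
  | cons r0 rs ih =>
    intro hnd m r'
    have hr0 : r0 ∉ rs := (List.nodup_cons.mp hnd).1
    simp only [List.foldl_cons]
    rw [ih (List.nodup_cons.mp hnd).2]
    simp only [getD_set_char, List.length_set, List.mem_cons]
    by_cases hmem : r' ∈ rs
    · have hne : r' ≠ r0 := fun h => hr0 (h ▸ hmem)
      by_cases hlt : r' < m.length <;> simp [hmem, hne, hlt]
    · by_cases heq : r' = r0
      · subst heq
        by_cases hlt : r' < m.length <;> simp [hmem, hlt]
      · simp [hmem, heq]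

theorem rfold_length (G : Nat → Int → Int) :
    ∀ (cs : List Nat) (l : List Int),
      (cs.foldl (fun l c => l.set c (G c (l.getD c 0))) l).length = l.length := by
  intro cs
  induction cs with
  | nil => intro l; rfl
  | cons c0 cs ih => intro l; simp only [List.foldl_cons]; rw [ih]; simp

theorem rfold_getD (G : Nat → Int → Int) :
    ∀ (cs : List Nat), cs.Nodup → ∀ (l : List Int) (c' : Nat),
      (cs.foldl (fun l c => l.set c (G c (l.getD c 0))) l).getD c' 0 =
        if c' ∈ cs ∧ c' < l.length then G c' (l.getD c' 0) else l.getD c' 0 := by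
  intro cs
  induction cs with
  | nil => intro _ l c'; simp
  | cons c0 cs ih =>
    intro hnd l c'
    have hc0 : c0 ∉ cs := (List.nodup_cons.mp hnd).1
    simp only [List.foldl_cons]
    rw [ih (List.nodup_cons.mp hnd).2]
    simp only [getD_set_char, List.length_set, List.mem_cons]
    by_cases hmem : c' ∈ cs
    · have hne : c' ≠ c0 := fun h => hc0 (h ▸ hmem)
      by_cases hlt : c' < l.length <;> simp [hmem, hne, hlt]
    · by_cases heq : c' = c0
      · subst heq
        by_cases hlt : c' < l.length <;> simp [hmem, hlt]
      · simp [hmem, heq]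

theorem col_collapse (v : Nat → Int) (r : Nat) :
    ∀ (cs : List Nat) (m : List (List Int)),
      cs.foldl (fun res c => res.set r ((res.getD r []).set c (v c))) m =
        m.set r (cs.foldl (fun l c => l.set c (v c)) (m.getD r [])) := by
  intro cs
  induction cs with
  | nil => intro m; exact (set_getD_self m r []).symm
  | cons c0 cs ih =>
    intro m
    simp only [List.foldl_cons]
    rw [ih]
    by_cases hr : r < m.length
    · rw [getD_set_char]
      simp [hr, List.set_set]
    · have h1 : m.set r ((m.getD r []).set c0 (v c0)) = m :=
        List.set_eq_of_length_le (by omega)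
      rw [h1]
      rw [List.set_eq_of_length_le (by omega), List.set_eq_of_length_le (by omega)]

def mkGrid (h w : Nat) (f : Nat → Nat → Int) : List (List Int) :=
  (List.range h).map (fun r => (List.range w).map (f r))

theorem length_mkGrid (h w : Nat) (f : Nat → Nat → Int) : (mkGrid h w f).length = h := by
  simp [mkGrid]

theorem getD_mkGrid {h : Nat} (w : Nat) (f : Nat → Nat → Int) {r : Nat} (hr : r < h) :
    (mkGrid h w f).getD r [] = (List.range w).map (f r) :=
  PySem.List.getD_map_range _ _ _ _ hr

theorem mkGrid_congr {h w : Nat} {f g : Nat → Nat → Int}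
    (he : ∀ r < h, ∀ c < w, f r c = g r c) : mkGrid h w f = mkGrid h w g := by
  unfold mkGrid
  refine List.map_congr_left fun r hr => List.map_congr_left fun c hc => ?_
  exact he r (List.mem_range.mp hr) c (List.mem_range.mp hc)

theorem eq_mkGrid (m : List (List Int)) (h w : Nat) (f : Nat → Nat → Int)
    (hl : m.length = h) (hrow : ∀ r < h, m.getD r [] = (List.range w).map (f r)) :
    m = mkGrid h w f := by
  apply List.ext_getElem (by simp [mkGrid, hl])
  intro r h1 h2
  have hr : r < h := by omega
  have := hrow r hr
  rw [List.getD_eq_getElem _ _ h1] at this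
  rw [this]
  simp [mkGrid]

theorem eq_mapRange (l : List Int) (w : Nat) (v : Nat → Int)
    (hl : l.length = w) (he : ∀ c < w, l.getD c 0 = v c) : l = (List.range w).map v := by
  apply List.ext_getElem (by simp [hl])
  intro c h1 h2
  have hc : c < w := by omega
  have := he c hc
  rw [List.getD_eq_getElem _ _ h1] at this
  rw [this]
  simp

theorem gen_pass (h w Nh Nw : Nat) (G : Nat → Nat → Int → Int) (f : Nat → Nat → Int) :
    (rsN Nh).foldl (fun res r =>
        res.set r ((rsN Nw).foldl (fun l c => l.set c (G r c (l.getD c 0))) (res.getD r []))) (mkGrid h w f) =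
      mkGrid h w (fun r c =>
        if (1 ≤ r ∧ r < Nh + 1) ∧ (1 ≤ c ∧ c < Nw + 1) then G r c (f r c) else f r c) := by
  apply eq_mkGrid
  · exact (gfold_length (fun r l => (rsN Nw).foldl (fun l c => l.set c (G r c (l.getD c 0))) l) _ _).trans
      (length_mkGrid h w f)
  · intro r hr
    rw [gfold_getD (fun r l => (rsN Nw).foldl (fun l c => l.set c (G r c (l.getD c 0))) l) _ (nodup_rsN _)]
    rw [length_mkGrid, getD_mkGrid w f hr]
    by_cases hmem : r ∈ rsN Nh
    · rw [if_pos ⟨hmem, hr⟩]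
      apply eq_mapRange
      · exact (rfold_length _ _ _).trans (by simp)
      · intro c hc
        rw [rfold_getD _ _ (nodup_rsN _)]
        have hlw : ((List.range w).map (f r)).length = w := by simp
        rw [hlw, PySem.List.getD_map_range _ _ _ _ hc]
        rw [mem_rsN] at hmem
        by_cases hcm : c ∈ rsN Nw
        · rw [if_pos ⟨hcm, hc⟩]
          rw [mem_rsN] at hcm
          rw [if_pos ⟨hmem, hcm⟩]
        · rw [if_neg (fun hh => hcm (And.left hh))]
          rw [mem_rsN] at hcm
          rw [if_neg (fun hh => hcm hh.2)]
    · rw [if_neg (fun hh => hmem hh.1)]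
      apply (List.map_congr_left _).symm
      intro c _
      rw [mem_rsN] at hmem
      exact if_neg (fun hh => hmem hh.1)

theorem pyRange_one_rsN (b : Int) :
    PySem.List.pyRange 1 b 1 = List.map (fun (r : Nat) => (r : Int)) (rsN (b - 1).toNat) := by
  rw [PySem.List.pyRange_one]
  unfold rsN
  rw [List.map_map]
  apply List.map_congr_left
  intro k _
  simp only [Function.comp_apply]
  push_cast
  ring

theorem initA_eq (h w : Nat) :
    (PySem.List.pyRange 0 (h : Int) 1).map (fun _ =>
        (PySem.List.pyRange 0 (w : Int) 1).map (fun _ => (0 : Int))) =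
      mkGrid h w (fun _ _ => 0) := by
  rw [List.map_const', List.map_const', PySem.List.length_pyRange_one, PySem.List.length_pyRange_one]
  unfold mkGrid
  rw [List.map_const', List.map_const']
  simp

theorem initB_eq (h w : Nat) :
    (PySem.List.pyRange 0 (h : Int) 1).map (fun _ => List.replicate ((w : Int)).toNat (0 : Int)) =
      mkGrid h w (fun _ _ => 0) := by
  rw [List.map_const', PySem.List.length_pyRange_one]
  unfold mkGrid
  rw [List.map_const', List.map_const']
  simp

theorem Afold_char (pa kernel : List (List Int)) (h w : Nat) :
    (PySem.List.pyRange 1 ((h : Int) - 1) 1).foldl (fun res row =>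
        (PySem.List.pyRange 1 ((w : Int) - 1) 1).foldl (fun res col =>
          PySem.List.pySetD res row
            (PySem.List.pySetD (PySem.List.pyGetD res row []) col
              (accA pa kernel row col))) res) (mkGrid h w (fun _ _ => 0)) =
      mkGrid h w (fun r c =>
        if (1 ≤ r ∧ r < ((h : Int) - 1 - 1).toNat + 1) ∧ (1 ≤ c ∧ c < ((w : Int) - 1 - 1).toNat + 1)
        then accA pa kernel (r : Int) (c : Int) else 0) := by
  rw [pyRange_one_rsN ((h : Int) - 1), pyRange_one_rsN ((w : Int) - 1)]
  simp only [List.foldl_map, PySem.List.pySetD_natCast, PySem.List.pyGetD_natCast]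
  simp only [col_collapse]
  exact gen_pass h w ((h : Int) - 1 - 1).toNat ((w : Int) - 1 - 1).toNat
    (fun r c _ => accA pa kernel (r : Int) (c : Int)) (fun _ _ => 0)

theorem tap_char (pa kernel : List (List Int)) (h w : Nat) (i j : Int) (f : Nat → Nat → Int) :
    (PySem.List.pyRange 1 ((h : Int) - 1) 1).foldl (fun res row =>
        PySem.List.pySetD res row
          ((PySem.List.pyRange 1 ((w : Int) - 1) 1).foldl (fun dst col =>
            PySem.List.pySetD dst col
              (PySem.List.pyGetD dst col 0 +
                PySem.List.pyGetD (PySem.List.pyGetD kernel (i + 1) []) (j + 1) 0 *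
                  PySem.List.pyGetD (PySem.List.pyGetD pa (row + i) []) (col + j) 0))
            (PySem.List.pyGetD res row []))) (mkGrid h w f) =
      mkGrid h w (fun r c =>
        if (1 ≤ r ∧ r < ((h : Int) - 1 - 1).toNat + 1) ∧ (1 ≤ c ∧ c < ((w : Int) - 1 - 1).toNat + 1)
        then f r c +
            PySem.List.pyGetD (PySem.List.pyGetD kernel (i + 1) []) (j + 1) 0 *
              PySem.List.pyGetD (PySem.List.pyGetD pa ((r : Int) + i) []) ((c : Int) + j) 0
        else f r c) := by
  rw [pyRange_one_rsN ((h : Int) - 1), pyRange_one_rsN ((w : Int) - 1)]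
  simp only [List.foldl_map, PySem.List.pySetD_natCast, PySem.List.pyGetD_natCast]
  exact gen_pass h w ((h : Int) - 1 - 1).toNat ((w : Int) - 1 - 1).toNat
    (fun r c old => old +
      PySem.List.pyGetD (PySem.List.pyGetD kernel (i + 1) []) (j + 1) 0 *
        PySem.List.pyGetD (PySem.List.pyGetD pa ((r : Int) + i) []) ((c : Int) + j) 0) f

theorem pyRange_taps : PySem.List.pyRange (-1) 2 1 = [-1, 0, 1] := by decide

theorem AB_eq (pa kernel : List (List Int)) :
    border_ignore_filter pa kernel = border_ignore_filter_alt pa kernel := by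
  simp only [border_ignore_filter, border_ignore_filter_alt]
  simp only [initA_eq, initB_eq]
  by_cases hd : ((pa.length : Int)) < 3 ∨ (((PySem.List.pyGetD pa 0 []).length : Int)) < 3
  · rw [if_pos hd, Afold_char]
    apply mkGrid_congr
    intro r hr c hc
    rw [if_neg]
    rintro ⟨⟨h1, h2⟩, ⟨h3, h4⟩⟩
    omega
  · rw [if_neg hd]
    simp only [List.foldl_cons, List.foldl_nil]
    rw [Afold_char]
    rw [tap_char, tap_char, tap_char, tap_char, tap_char, tap_char, tap_char, tap_char, tap_char]
    apply mkGrid_congr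
    intro r hr c hc
    by_cases hP : (1 ≤ r ∧ r < (((pa.length : Int)) - 1 - 1).toNat + 1) ∧
        (1 ≤ c ∧ c < ((((PySem.List.pyGetD pa 0 []).length : Int)) - 1 - 1).toNat + 1)
    · rw [if_pos hP]
      simp only [if_pos hP]
      simp only [accA, pyRange_taps, List.foldl_cons, List.foldl_nil]
      ring
    · rw [if_neg hP]
      simp only [if_neg hP]

-- ===== VERDICT (by name: the statement is the Claim_ definition above) =====
theorem border_ignore_filter_spec : Claim_equal_border_ignore_filter := by
  intro pixel_array kernel _ _
  exact AB_eq pixel_array kernel
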